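-- pv_equiv track=rewrite | github.com/youron1115/github_mmwave_competition | 2025/KKT_Module/KKT_Module/DataReceive/DataReceiver/MultiResults.py | __parseAISram
-- ===== SOURCE A (Python) =====
-- def __parseAISram(arry):
--     ai_sram = []
--     binvals=''
--     for i in range(len(arry)):
--         binval = bin(arry[i]).split('0b')[1].zfill(32)
--         binvals = binval+binvals
--
--     ai_sram_list = [binvals[i: i + 12] for i in range(0, len(binvals), 12)]
--
--     for i in range(len(ai_sram_list)):
--         ai_sram.insert(0,  unsign2sign(int(ai_sram_list[i],2),12))
--
--
--     return ai_sram
--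
-- def unsign2sign(x, bit):
--     '''
--     return sign-extend value.
--
--     Parameters:
--             NA.
--     Returns:
--             (y) : a integer between 0~2^bit
--     '''
--     if x >= 0 and x < 2 ** (bit-1):
--         y = x
--     elif x >= 2 ** (bit-1) and x < 2**bit:
--         y = x - 2**(bit)
--     else:
--         raise Exception('Value is out of bit range')
--     return y
-- ===== SOURCE B (Python) =====
-- def __parseAISram(arry):
--     # Arithmetic re-implementation: pack the 32-bit words (Python's bin() formats the
--     # magnitude, so each word contributes abs(w)) into one integer and extract the
--     # signed 12-bit fields from the low end upward; no string building at all.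
--     N = 0
--     for w in reversed(arry):
--         N = (N << 32) + abs(w)
--     L = 32 * len(arry)
--     if L == 0:
--         return []
--     r = L % 12
--     first = r if r else 12
--     out = [_sign12(N & ((1 << first) - 1))]
--     for shift in range(first, L, 12):
--         out.append(_sign12((N >> shift) & 0xFFF))
--     return out
--
-- def _sign12(v):
--     return v - 4096 if v >= 2048 else v
-- ===== Notes on version B (the rewrite author's own statement) =====
-- stated objective: alternative
-- what changed: Replaces A's per-word binary-string building, string chunking and re-parsing with pure integer arithmetic: pack the word magnitudes into one big integer and extract the signed 12-bit fields with shifts and masks.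
import Mathlib
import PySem

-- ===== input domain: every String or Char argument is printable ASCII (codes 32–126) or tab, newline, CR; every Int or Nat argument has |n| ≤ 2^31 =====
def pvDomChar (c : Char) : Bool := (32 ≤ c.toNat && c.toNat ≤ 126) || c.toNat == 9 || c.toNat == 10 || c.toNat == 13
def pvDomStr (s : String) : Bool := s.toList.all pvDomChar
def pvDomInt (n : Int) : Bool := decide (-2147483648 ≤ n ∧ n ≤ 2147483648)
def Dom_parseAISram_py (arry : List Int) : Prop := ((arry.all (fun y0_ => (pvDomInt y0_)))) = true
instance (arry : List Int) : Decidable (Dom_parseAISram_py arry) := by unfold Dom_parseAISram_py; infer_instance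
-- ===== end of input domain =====

-- B replaces A's binary-string building/chunking/reparsing with integer shift-and-mask
-- field extraction; equivalence is proved on all of Dom.

-- ===== PORT A =====
-- binary digits of n (msb first) for n ≥ 1; exact: the digits Python's bin() prints
def binDigits : Nat → List Char
  | 0 => []
  | (n+1) => binDigits ((n+1)/2) ++ [if (n+1) % 2 = 1 then '1' else '0']
decreasing_by exact Nat.div_lt_self (Nat.succ_pos n) one_lt_two

-- bin(x).split('0b')[1]: the binary digits of |x| ('0' for 0; a '-' sign is discarded by the split)
def pyBinMag (x : Int) : List Char := if x = 0 then ['0'] else binDigits x.natAbs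

-- s.zfill(32): left-pad with '0' to 32 chars (the strings here never carry a sign)
def zfill32 (s : List Char) : List Char := List.replicate (32 - s.length) '0' ++ s

-- int(s, 2): exact on the non-empty '0'/'1'-digit strings A parses
def parseBin2 (s : List Char) : Int := s.foldl (fun a c => 2*a + (if c = '1' then 1 else 0)) 0

-- literal unsign2sign; the Python 'raise' branch (unreachable for A's calls: x is the
-- value of at most 12 binary digits) is ported as the identity
def unsign2sign (x : Int) (bit : Nat) : Int :=
  if 0 ≤ x ∧ x < 2^(bit-1) then x
  else if 2^(bit-1) ≤ x ∧ x < 2^bit then x - 2^bit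
  else x

-- Python strings ported as List Char; the 'for i in range(len(arry))' loop reading arry[i]
-- is the fold over arry (same traversal order); insert(0, v) is cons
def parseAISram_py (arry : List Int) : List Int :=
  let binvals := arry.foldl (fun acc x => zfill32 (pyBinMag x) ++ acc) []
  let ai_sram_list := (PySem.List.pyRange 0 (binvals.length : Int) 12).map
      (fun i => PySem.List.slice binvals (some i) (some (i+12)))
  ai_sram_list.foldl (fun acc s => unsign2sign (parseBin2 s) 12 :: acc) []

-- ===== PORT B =====
-- _sign12(v); every caller passes a masked value 0 ≤ v < 4096, ported with a Nat argument
def sign12 (v : Nat) : Int := if 2048 ≤ v then (v : Int) - 4096 else (v : Int)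

def parseAISram_py_alt (arry : List Int) : List Int :=
  let N : Nat := arry.reverse.foldl (fun acc w => (acc <<< 32) + w.natAbs) 0
  let L : Nat := 32 * arry.length
  if L = 0 then []
  else
    let r := L % 12
    let first := if r = 0 then 12 else r
    let init := [sign12 (N &&& ((1 <<< first) - 1))]
    (PySem.List.pyRange (first : Int) (L : Int) 12).foldl
      (fun out shift => out ++ [sign12 ((N >>> shift.toNat) &&& 4095)]) init

-- ===== PRECONDITION & SPEC =====
def Spec_parseAISram_py (arry : List Int) (out : List Int) : Prop := out = parseAISram_py_alt arry
instance (arry : List Int) (out : List Int) : Decidable (Spec_parseAISram_py arry out) := by unfold Spec_parseAISram_py; infer_instance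

-- ===== CLAIM (what is proved, stated in full; the proofs are below) =====
def Claim_equal_parseAISram_py : Prop := ∀ (arry : List Int), Dom_parseAISram_py arry → Spec_parseAISram_py arry (parseAISram_py arry)

-- ===== LEMMAS AND PROOFS =====

-- n written in exactly k binary digits (msb first): the semantic anchor of the proof
def natToBits : Nat → Nat → List Char
  | 0, _ => []
  | (k+1), n => natToBits k (n/2) ++ [if n % 2 = 1 then '1' else '0']

-- the packed little-endian value of the word magnitudes
def lval : List Int → Nat
  | [] => 0
  | w :: t => w.natAbs + 2^32 * lval t

-- the common normal form both ports are reduced to: the signed 12-bit fields of (N, L)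
def fields (N L : Nat) : List Int :=
  let first := if L % 12 = 0 then 12 else L % 12
  (List.range ((L+11)/12)).map
    (fun m => sign12 (if m = 0 then N % 2^first else (N / 2^(first + 12*(m-1))) % 2^12))

theorem length_natToBits (k n : Nat) : (natToBits k n).length = k := by
  induction k generalizing n with
  | zero => simp [natToBits]
  | succ k ih => simp [natToBits, ih]

theorem natToBits_split (a b n : Nat) :
    natToBits (a + b) n = natToBits a (n / 2^b) ++ natToBits b n := by
  induction b generalizing n with
  | zero => simp [natToBits]
  | succ b ih =>
    have h1 : a + (b+1) = (a + b) + 1 := by omega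
    rw [h1]
    show natToBits ((a+b)+1) n = _
    rw [natToBits, ih (n/2), natToBits]
    have h2 : n / 2 / 2^b = n / 2^(b+1) := by
      rw [Nat.div_div_eq_div_mul, pow_succ]; ring_nf
    rw [h2, List.append_assoc]

theorem natToBits_mod (k n : Nat) : natToBits k (n % 2^k) = natToBits k n := by
  induction k generalizing n with
  | zero => simp [natToBits]
  | succ k ih =>
    rw [natToBits, natToBits]
    have hmod2 : (n % 2^(k+1)) % 2 = n % 2 := by
      apply Nat.mod_mod_of_dvd
      exact ⟨2^k, by rw [pow_succ]; ring⟩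
    have hdiv2 : (n % 2^(k+1)) / 2 = (n / 2) % 2^k := by
      rw [pow_succ]; exact Nat.mod_mul_left_div_self n 2 (2^k)
    rw [hmod2, hdiv2, ih]

theorem natToBits_zero_val (k : Nat) : natToBits k 0 = List.replicate k '0' := by
  induction k with
  | zero => simp [natToBits]
  | succ k ih => rw [natToBits, Nat.zero_div, ih, List.replicate_succ']; simp

theorem mod_pow_two_succ (n k : Nat) : n % 2^(k+1) = 2*((n/2) % 2^k) + n % 2 := by
  have hdiv2 : (n % 2^(k+1)) / 2 = (n / 2) % 2^k := by
    rw [pow_succ]; exact Nat.mod_mul_left_div_self n 2 (2^k)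
  have hmod2 : (n % 2^(k+1)) % 2 = n % 2 := by
    apply Nat.mod_mod_of_dvd
    exact ⟨2^k, by rw [pow_succ]; ring⟩
  omega

theorem parseBin2_aux (k : Nat) : ∀ (n : Nat) (a : Int),
    (natToBits k n).foldl (fun a c => 2*a + (if c = '1' then 1 else 0)) a
      = a * 2^k + ((n % 2^k : Nat) : Int) := by
  induction k with
  | zero => intro n a; simp [natToBits, Nat.mod_one]
  | succ k ih =>
    intro n a
    rw [natToBits, List.foldl_append, ih (n/2) a]
    have hd : (if (if n % 2 = 1 then '1' else '0') = '1' then (1:Int) else 0) = ((n % 2 : Nat) : Int) := by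
      rcases Nat.mod_two_eq_zero_or_one n with h | h <;> simp [h]
    simp only [List.foldl_cons, List.foldl_nil, hd]
    rw [mod_pow_two_succ n k]
    push_cast
    ring

theorem natToBits_eq_zfill (k : Nat) : ∀ n : Nat, 0 < n → n < 2^k →
    natToBits k n = List.replicate (k - (binDigits n).length) '0' ++ binDigits n := by
  induction k with
  | zero => intro n h1 h2; omega
  | succ k ih =>
    intro n h1 h2
    obtain ⟨m, rfl⟩ : ∃ m, n = m + 1 := ⟨n - 1, by omega⟩
    rw [natToBits, binDigits]
    by_cases h0 : (m+1)/2 = 0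
    · have hm : m = 0 := by omega
      subst hm
      rw [h0, natToBits_zero_val, binDigits]
      simp
    · have hlt : (m+1)/2 < 2^k := by
        have : (2:Nat)^(k+1) = 2^k * 2 := by rw [pow_succ]
        omega
      rw [ih ((m+1)/2) (by omega) hlt]
      have hlen : (binDigits ((m+1)/2) ++ [if (m+1) % 2 = 1 then '1' else '0']).length
          = (binDigits ((m+1)/2)).length + 1 := by simp
      rw [hlen, List.append_assoc]
      congr 2
      omega

theorem zfill32_pyBinMag (x : Int) (h : x.natAbs < 2^32) :
    zfill32 (pyBinMag x) = natToBits 32 x.natAbs := by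
  by_cases hx : x = 0
  · subst hx
    decide
  · have hpos : 0 < x.natAbs := Int.natAbs_pos.mpr hx
    rw [pyBinMag, if_neg hx, natToBits_eq_zfill 32 x.natAbs hpos h]
    rfl

theorem binvals_eq (l : List Int) : ∀ (m M : Nat), M < 2^m →
    (∀ w ∈ l, w.natAbs < 2^32) →
    l.foldl (fun acc x => zfill32 (pyBinMag x) ++ acc) (natToBits m M)
      = natToBits (32 * l.length + m) (lval l * 2^m + M) := by
  induction l with
  | nil => intro m M _ _; simp [lval]
  | cons x t ih =>
    intro m M hM hw
    have hx : x.natAbs < 2^32 := hw x (by simp)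
    rw [List.foldl_cons, zfill32_pyBinMag x hx]
    have hcomb : natToBits 32 x.natAbs ++ natToBits m M
        = natToBits (32 + m) (x.natAbs * 2^m + M) := by
      rw [natToBits_split 32 m (x.natAbs * 2^m + M)]
      have hdiv : (x.natAbs * 2^m + M) / 2^m = x.natAbs := by
        rw [mul_comm, Nat.mul_add_div (Nat.pow_pos (show 0 < 2 by omega)),
          Nat.div_eq_of_lt hM, Nat.add_zero]
      have hmod : natToBits m (x.natAbs * 2^m + M) = natToBits m M := by
        rw [← natToBits_mod m (x.natAbs * 2^m + M), mul_comm, Nat.mul_add_mod,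
          Nat.mod_eq_of_lt hM]
      rw [hdiv, hmod]
    rw [hcomb]
    have hM' : x.natAbs * 2^m + M < 2^(32 + m) := by
      have h1 : x.natAbs * 2^m + M < (x.natAbs + 1) * 2^m := by
        have hp : (0:Nat) < 2^m := Nat.pow_pos (by omega)
        nlinarith
      have h2 : (x.natAbs + 1) * 2^m ≤ 2^32 * 2^m :=
        Nat.mul_le_mul_right _ (by omega)
      rw [pow_add]
      omega
    rw [ih (32 + m) (x.natAbs * 2^m + M) hM' (fun w hwm => hw w (by simp [hwm]))]
    have he : 32 * t.length + (32 + m) = 32 * (x :: t).length + m := by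
      simp [List.length_cons]; ring
    have hv : lval t * 2^(32 + m) + (x.natAbs * 2^m + M) = lval (x :: t) * 2^m + M := by
      show _ = (x.natAbs + 2^32 * lval t) * 2^m + M
      rw [pow_add]; ring
    rw [he, hv]

theorem revfold_eq_lval (l : List Int) : ∀ a : Nat,
    l.reverse.foldl (fun acc w => (acc <<< 32) + w.natAbs) a
      = a * 2^(32 * l.length) + lval l := by
  induction l with
  | nil => intro a; simp [lval]
  | cons x t ih =>
    intro a
    rw [List.reverse_cons, List.foldl_append, ih a]
    show ((a * 2^(32 * t.length) + lval t) <<< 32) + x.natAbs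
        = a * 2^(32 * (x :: t).length) + lval (x :: t)
    rw [Nat.shiftLeft_eq]
    show _ = a * 2^(32 * (t.length + 1)) + (x.natAbs + 2^32 * lval t)
    have h : 32 * (t.length + 1) = 32 * t.length + 32 := by ring
    rw [h, pow_add]; ring

theorem u2s_eq_sign12 (v : Nat) (h : v < 4096) :
    unsign2sign ((v : Nat) : Int) 12 = sign12 v := by
  unfold unsign2sign sign12
  by_cases h1 : v < 2048
  · rw [if_pos, if_neg (by omega)]
    constructor
    · positivity
    · show (v:Int) < 2^11; exact_mod_cast (by omega : v < 2048)
  · rw [if_neg, if_pos, if_pos (by omega)]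
    · norm_num
    · constructor
      · show (2:Int)^11 ≤ v; exact_mod_cast (by omega : 2048 ≤ v)
      · show (v:Int) < 2^12; exact_mod_cast (by omega : v < 4096)
    · intro ⟨_, hc⟩
      have : (v:Int) < 2048 := by exact_mod_cast hc
      omega

-- the j-th 12-char chunk of the bit string (counted from the high end)
theorem chunk_eq (L N : Nat) (j : Nat) (hj : 12*j < L) :
    ((natToBits L N).drop (12*j)).take 12
      = natToBits (min 12 (L - 12*j)) (N / 2^(L - 12*j - min 12 (L - 12*j))) := by
  set i := 12*j with hi
  set w := min 12 (L - i) with hwdef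
  set t := L - i - w with htdef
  have hL : L = i + (w + t) := by omega
  have hsplit : natToBits L N
      = natToBits i (N / 2^(w+t)) ++ (natToBits w (N / 2^t) ++ natToBits t N) := by
    rw [hL, natToBits_split i (w+t) N, natToBits_split w t N]
  rw [hsplit, List.drop_left' (length_natToBits i _)]
  by_cases hw12 : 12 ≤ L - i
  · have hw : w = 12 := by omega
    rw [List.take_left' (by rw [length_natToBits, hw])]
  · have hw : w = L - i := by omega
    have ht0 : t = 0 := by omega
    rw [ht0, natToBits]
    rw [List.append_nil, List.take_of_length_le (by rw [length_natToBits]; omega)]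

-- reversing an insert(0,·) loop
theorem foldl_cons_rev {A B : Type} (f : A → B) (l : List A) : ∀ (a : List B),
    l.foldl (fun acc s => f s :: acc) a = (l.map f).reverse ++ a := by
  induction l with
  | nil => intro a; simp
  | cons x t ih => intro a; simp [ih (f x :: a)]

-- B's port in normal form
theorem B_eq (arry : List Int) (hne : arry ≠ []) :
    parseAISram_py_alt arry = fields (lval arry) (32 * arry.length) := by
  have hn : 1 ≤ arry.length := by
    cases arry with | nil => exact absurd rfl hne | cons a t => simp
  simp only [parseAISram_py_alt]
  rw [if_neg (by omega : ¬ 32 * arry.length = 0), revfold_eq_lval arry 0]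
  simp only [Nat.zero_mul, Nat.zero_add]
  set L := 32 * arry.length with hLdef
  set N := lval arry with hNdef
  have hL32 : 32 ≤ L := by omega
  set first := if L % 12 = 0 then 12 else L % 12 with hfirstdef
  have hfc : (L % 12 = 0 ∧ first = 12) ∨ (L % 12 ≠ 0 ∧ first = L % 12) := by
    by_cases h : L % 12 = 0
    · exact Or.inl ⟨h, by rw [hfirstdef, if_pos h]⟩
    · exact Or.inr ⟨h, by rw [hfirstdef, if_neg h]⟩
  set k := (L + 11) / 12 with hkdef
  have hk3 : 3 ≤ k := by omega
  have hmask1 : N &&& ((1 <<< first) - 1) = N % 2^first := by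
    rw [Nat.shiftLeft_eq, Nat.one_mul, Nat.and_two_pow_sub_one_eq_mod]
  rw [hmask1, PySem.List.foldl_append_singleton_eq_map,
    PySem.List.pyRange_of_pos (first : Int) (L : Int) (by norm_num : (0:Int) < 12)]
  have hfL : (first : Int) < (L : Int) := by
    have : first < L := by rcases hfc with ⟨h, e⟩ | ⟨h, e⟩ <;> omega
    exact_mod_cast this
  rw [if_pos hfL]
  have hK : (((L:Int) - (first:Int) + 12 - 1) / 12).toNat = k - 1 := by
    have hfle : first ≤ L := by omega
    have h1 : ((L:Int) - (first:Int) + 12 - 1) = ((L - first + 11 : Nat) : Int) := by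
      push_cast [Nat.cast_sub hfle]; ring
    have h2 : ((L - first + 11 : Nat) : Int) / ((12:Nat) : Int)
        = (((L - first + 11) / 12 : Nat) : Int) := by exact_mod_cast rfl
    rw [h1, show ((12:Int)) = (((12:Nat)):Int) by norm_num, h2, Int.toNat_natCast]
    rcases hfc with ⟨h, e⟩ | ⟨h, e⟩ <;> omega
  rw [hK]
  -- unfold fields into head and tail
  simp only [fields, ← hfirstdef]
  rw [show (L + 11) / 12 = (k - 1) + 1 by omega, List.range_succ_eq_map,
    List.map_cons, List.map_map, List.map_map, List.singleton_append]
  congr 1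
  apply List.map_congr_left
  intro t ht
  simp only [Function.comp_apply]
  have htn : ((first : Int) + 12 * ((t : Nat) : Int)).toNat = first + 12 * t := by omega
  rw [htn, Nat.shiftRight_eq_div_pow,
    show (4095 : Nat) = 2^12 - 1 by norm_num, Nat.and_two_pow_sub_one_eq_mod]
  simp

-- A's port in normal form
theorem A_eq (arry : List Int) (hw : ∀ w ∈ arry, w.natAbs < 2^32) (hne : arry ≠ []) :
    parseAISram_py arry = fields (lval arry) (32 * arry.length) := by
  have hn : 1 ≤ arry.length := by
    cases arry with | nil => exact absurd rfl hne | cons a t => simp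
  simp only [parseAISram_py]
  rw [show (([] : List Char)) = natToBits 0 0 from rfl,
    binvals_eq arry 0 0 (by norm_num) hw]
  simp only [Nat.add_zero, pow_zero, Nat.mul_one, length_natToBits]
  set L := 32 * arry.length with hLdef
  set N := lval arry with hNdef
  have hL32 : 32 ≤ L := by omega
  set first := if L % 12 = 0 then 12 else L % 12 with hfirstdef
  have hfc : (L % 12 = 0 ∧ first = 12) ∨ (L % 12 ≠ 0 ∧ first = L % 12) := by
    by_cases h : L % 12 = 0
    · exact Or.inl ⟨h, by rw [hfirstdef, if_pos h]⟩
    · exact Or.inr ⟨h, by rw [hfirstdef, if_neg h]⟩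
  set k := (L + 11) / 12 with hkdef
  have hk3 : 3 ≤ k := by omega
  rw [foldl_cons_rev, List.append_nil,
    PySem.List.pyRange_of_pos 0 (L : Int) (by norm_num : (0:Int) < 12)]
  rw [if_pos (by exact_mod_cast (by omega : 0 < L) : (0:Int) < (L:Int))]
  have hK : (((L:Int) - 0 + 12 - 1) / 12).toNat = k := by
    have h1 : ((L:Int) - 0 + 12 - 1) = ((L + 11 : Nat) : Int) := by push_cast; ring
    have h2 : ((L + 11 : Nat) : Int) / ((12:Nat) : Int)
        = (((L + 11) / 12 : Nat) : Int) := by exact_mod_cast rfl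
    rw [h1, show ((12:Int)) = (((12:Nat)):Int) by norm_num, h2, Int.toNat_natCast]
  rw [hK, List.map_map]
  -- elementwise comparison
  apply List.ext_getElem
  · simp only [fields, List.length_reverse, List.length_map, List.length_range]
    omega
  · intro m hm1 hm2
    simp only [fields, List.length_reverse, List.length_map, List.length_range] at hm1 hm2 ⊢
    rw [List.getElem_reverse]
    simp only [List.length_map, List.length_range, List.getElem_map, List.getElem_range,
      Function.comp_apply, ← hfirstdef]
    -- the chunk index, counted from the high end
    set j := k - 1 - m with hjdef
    have hj : 12 * j < L := by omega
    have harg1 : ((0 : Int) + 12 * ((j : Nat) : Int)) = ((12 * j : Nat) : Int) := by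
      push_cast; ring
    rw [harg1, show ((12 * j : Nat) : Int) + 12 = ((12 * j + 12 : Nat) : Int) by push_cast; ring,
      PySem.List.slice_natCast, show (12 * j + 12) - 12 * j = 12 by omega]
    rw [chunk_eq L N j hj]
    rw [show parseBin2 (natToBits (min 12 (L - 12*j)) (N / 2^(L - 12*j - min 12 (L - 12*j))))
        = (natToBits (min 12 (L - 12*j)) (N / 2^(L - 12*j - min 12 (L - 12*j)))).foldl
            (fun a c => 2*a + (if c = '1' then 1 else 0)) 0 from rfl,
      parseBin2_aux]
    have hwle : min 12 (L - 12*j) ≤ 12 := by omega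
    have hvlt : (N / 2^(L - 12*j - min 12 (L - 12*j))) % 2^(min 12 (L - 12*j)) < 4096 := by
      have h1 : (N / 2^(L - 12*j - min 12 (L - 12*j))) % 2^(min 12 (L - 12*j))
          < 2^(min 12 (L - 12*j)) := Nat.mod_lt _ (Nat.pow_pos (by omega))
      have h2 : (2:Nat)^(min 12 (L - 12*j)) ≤ 2^12 :=
        Nat.pow_le_pow_right (by omega) hwle
      norm_num at h2 ⊢
      omega
    rw [Int.zero_mul, Int.zero_add, u2s_eq_sign12 _ hvlt]
    -- now a pure Nat identity on the field value
    congr 1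
    cases m with
    | zero =>
      have hmin : min 12 (L - 12*j) = first := by
        rcases hfc with ⟨h, e⟩ | ⟨h, e⟩ <;> omega
      rw [hmin, show L - 12*j - first = 0 by
        rcases hfc with ⟨h, e⟩ | ⟨h, e⟩ <;> omega]
      simp
    | succ m' =>
      have hmin : min 12 (L - 12*j) = 12 := by
        rcases hfc with ⟨h, e⟩ | ⟨h, e⟩ <;> omega
      rw [hmin, show L - 12*j - 12 = first + 12*m' by
        rcases hfc with ⟨h, e⟩ | ⟨h, e⟩ <;> omega]
      norm_num

-- ===== VERDICT (by name: the statement is the Claim_ definition above) =====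
theorem parseAISram_py_spec : Claim_equal_parseAISram_py := by
  intro arry hdom
  show parseAISram_py arry = parseAISram_py_alt arry
  have hw : ∀ w ∈ arry, w.natAbs < 2^32 := by
    intro w hwm
    have h := List.all_eq_true.mp hdom w hwm
    simp only [pvDomInt, decide_eq_true_eq] at h
    omega
  by_cases hne : arry = []
  · subst hne; rfl
  · rw [A_eq arry hw hne, B_eq arry hne]
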